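-- pv_equiv track=rewrite | github.com/colinmorris/csc236 | docs/assignments/umax.py | umax1
-- ===== SOURCE A (Python) =====
-- def umax1(A):
--     """Our first attempt at solving the unique maximum problem.
--     According to 2(b), it has a bug.
--     """
--     if len(A) == 1:
--         return A[0]
--     head = A[0]
--     tail = A[1:]
--     tmax = umax1(tail)
--     if head == tmax:
--         return -1
--     elif head > tmax:
--         return head
--     else:
--         return tmax
-- ===== SOURCE B (Python) =====
-- def umax1(A):
--     """Iterative right-to-left fold instead of list-slicing recursion: O(n) time,
--     O(1) extra state, same result (including the -1 sentinel propagation)."""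
--     r = A[::-1]
--     acc = r[0]
--     for x in r[1:]:
--         acc = -1 if x == acc else max(x, acc)
--     return acc
-- ===== Notes on version B (the rewrite author's own statement) =====
-- stated objective: faster
-- what changed: Replaces the list-slicing recursion (each call copies the tail) with a single backward linear fold over the reversed list keeping one accumulator.
-- outside the precondition, e.g. on umax1([]): A raises IndexError, B raises IndexError
import Mathlib
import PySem

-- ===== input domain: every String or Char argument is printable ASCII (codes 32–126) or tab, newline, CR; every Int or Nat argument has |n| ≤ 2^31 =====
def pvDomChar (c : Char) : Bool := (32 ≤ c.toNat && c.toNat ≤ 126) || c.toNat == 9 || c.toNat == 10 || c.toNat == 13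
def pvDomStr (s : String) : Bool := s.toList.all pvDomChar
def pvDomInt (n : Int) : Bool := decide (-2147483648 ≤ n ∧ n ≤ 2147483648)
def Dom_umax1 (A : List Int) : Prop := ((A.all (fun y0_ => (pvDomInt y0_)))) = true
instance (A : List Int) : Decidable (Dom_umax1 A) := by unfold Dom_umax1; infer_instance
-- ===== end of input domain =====

-- B replaces A's list-slicing recursion with a single backward linear fold (faster); same return value on all non-empty lists.

-- ===== PORT A =====
-- literal transliteration of A's recursion: len==1 → A[0]; else combine head with umax1(tail)
def umax1 (A : List Int) : Int :=
  match A with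
  | [] => 0          -- unreachable under Pre_umax1 (Python raises IndexError on [])
  | [a] => a
  | head :: tail =>
      let tmax := umax1 tail
      if head = tmax then -1
      else if head > tmax then head
      else tmax

-- ===== PORT B =====
-- Source B: r = A[::-1]; acc = r[0]; for x in r[1:]: acc = -1 if x == acc else max(x, acc)
def umax1_alt (A : List Int) : Int :=
  match A.reverse with
  | [] => 0          -- unreachable under Pre_umax1 (Python raises IndexError on [])
  | acc0 :: rest => rest.foldl (fun acc x => if x = acc then -1 else max x acc) acc0

-- ===== PRECONDITION & SPEC =====
-- Pre_ excludes only the empty list, on which Python A raises IndexError (A[0]).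
def Pre_umax1 (A : List Int) : Prop := A ≠ []
instance (A : List Int) : Decidable (Pre_umax1 A) := by unfold Pre_umax1; infer_instance
def pvWitness_umax1 : List Int := [3, 1, 3]

def Spec_umax1 (A : List Int) (out : Int) : Prop := out = umax1_alt A
instance (A : List Int) (out : Int) : Decidable (Spec_umax1 A out) := by unfold Spec_umax1; infer_instance

-- ===== CLAIM (what is proved, stated in full; the proofs are below) =====
def Claim_equal_umax1 : Prop := ∀ (A : List Int), Dom_umax1 A → Pre_umax1 A → Spec_umax1 A (umax1 A)

-- ===== LEMMAS AND PROOFS =====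

-- B's cons law: prepending an element applies the step function last.
theorem umax1_alt_cons (a b : Int) (l : List Int) :
    umax1_alt (a :: b :: l) =
      (if a = umax1_alt (b :: l) then -1 else max a (umax1_alt (b :: l))) := by
  have hne : (b :: l).reverse ≠ [] := by simp
  obtain ⟨c, m, hcm⟩ := List.exists_cons_of_ne_nil hne
  have : (a :: b :: l).reverse = c :: (m ++ [a]) := by
    simp [List.reverse_cons, hcm]
  simp [umax1_alt, this, hcm, List.foldl_append]

theorem umax1_eq_alt (l : List Int) (a : Int) : umax1 (a :: l) = umax1_alt (a :: l) := by
  induction l generalizing a with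
  | nil => simp [umax1, umax1_alt]
  | cons b l ih =>
      rw [umax1_alt_cons, ← ih b]
      have hmax : ∀ x y : Int, (if x = y then (-1 : Int) else if x > y then x else y)
          = (if x = y then -1 else max x y) := by
        intro x y
        by_cases h : x = y
        · simp [h]
        · by_cases h2 : x > y
          · simp [h, h2, max_eq_left (le_of_lt h2)]
          · simp [h, h2, max_eq_right (le_of_not_gt h2)]
      show (let tmax := umax1 (b :: l);
            if a = tmax then -1 else if a > tmax then a else tmax) = _
      simp only []
      exact hmax a (umax1 (b :: l))

-- ===== VERDICT (by name: the statement is the Claim_ definition above) =====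
theorem umax1_spec : Claim_equal_umax1 := by
  intro A _ hpre
  obtain ⟨a, l, rfl⟩ := List.exists_cons_of_ne_nil hpre
  exact umax1_eq_alt l a
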